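-- pv_equiv track=rewrite | github.com/KB77GG/studytracker | scripts/audit_listening_alignment.py | trim_payload
-- ===== SOURCE A (Python) =====
-- def trim_payload(payload: dict, cut_index: int) -> dict:
--     next_payload = dict(payload)
--     next_parts = []
--     global_index = 0
--     for part in payload.get("parts", []):
--         next_part = dict(part)
--         next_segments = []
--         for segment in part.get("segments", []):
--             if global_index < cut_index:
--                 next_segments.append(segment)
--             global_index += 1
--         if next_segments:
--             next_part["segments"] = next_segments
--             next_parts.append(next_part)
--     next_payload["parts"] = next_parts
--     return next_payload
-- ===== SOURCE B (Python) =====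
-- def trim_payload(payload: dict, cut_index: int) -> dict:
--     next_parts = []
--     running = 0
--     for part in payload.get("parts", []):
--         segments = part.get("segments", [])
--         n = len(segments)
--         take = max(0, min(n, cut_index - running))
--         kept = segments[:take]
--         running += n
--         if kept:
--             next_part = dict(part)
--             next_part["segments"] = kept
--             next_parts.append(next_part)
--     return {**payload, "parts": next_parts}
-- ===== Notes on version B (the rewrite author's own statement) =====
-- stated objective: simpler
-- what changed: Replaces A's per-segment global counter and inner append loop with per-part arithmetic (clamped take = cut_index - offset) plus a single slice segments[:take].
import Mathlib
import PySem

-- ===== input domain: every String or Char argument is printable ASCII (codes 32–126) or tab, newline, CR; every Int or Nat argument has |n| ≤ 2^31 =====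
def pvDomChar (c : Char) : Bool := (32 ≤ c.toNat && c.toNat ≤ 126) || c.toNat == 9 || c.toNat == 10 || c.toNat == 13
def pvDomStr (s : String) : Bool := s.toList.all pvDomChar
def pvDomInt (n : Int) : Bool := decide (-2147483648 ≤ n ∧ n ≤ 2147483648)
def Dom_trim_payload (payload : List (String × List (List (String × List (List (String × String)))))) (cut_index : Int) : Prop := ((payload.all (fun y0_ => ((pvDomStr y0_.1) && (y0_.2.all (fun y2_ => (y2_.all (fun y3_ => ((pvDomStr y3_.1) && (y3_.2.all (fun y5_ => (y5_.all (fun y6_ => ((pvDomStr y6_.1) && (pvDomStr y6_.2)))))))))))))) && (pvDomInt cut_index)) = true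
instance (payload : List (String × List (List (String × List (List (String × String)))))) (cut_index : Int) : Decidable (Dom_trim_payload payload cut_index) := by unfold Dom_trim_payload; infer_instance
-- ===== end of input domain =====

-- B replaces A's per-segment global counter with per-part clamped-slice arithmetic (objective: simpler).

abbrev PvSeg : Type := List (String × String)
abbrev PvPart : Type := List (String × List PvSeg)

-- ===== PORT A =====
def trim_payload (payload : List (String × List (List (String × List (List (String × String)))))) (cut_index : Int) : List (String × List (List (String × List (List (String × String))))) :=
  let next_payload := PySem.Dict.ofList payload
  let st :=
    ((PySem.Dict.ofList payload).getD "parts" []).foldl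
      (fun (st : List PvPart × Int) part =>
        let next_part := PySem.Dict.ofList part
        let inner :=
          ((PySem.Dict.ofList part).getD "segments" []).foldl
            (fun (st2 : List PvSeg × Int) segment =>
              (if st2.2 < cut_index then st2.1 ++ [segment] else st2.1, st2.2 + 1))
            ([], st.2)
        if inner.1.isEmpty then (st.1, inner.2)
        else (st.1 ++ [(next_part.insert "segments" inner.1).items], inner.2))
      ([], 0)
  (next_payload.insert "parts" st.1).items

-- ===== PORT B =====
def pvTrimGo (cut_index : Int) (running : Int) : List PvPart → List PvPart
  | [] => []
  | part :: rest =>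
      let segments := (PySem.Dict.ofList part).getD "segments" []
      let n : Int := segments.length
      let take := max 0 (min n (cut_index - running))
      let kept := PySem.List.slice segments none (some take)
      let tail := pvTrimGo cut_index (running + n) rest
      if kept.isEmpty then tail
      else ((PySem.Dict.ofList part).insert "segments" kept).items :: tail

def trim_payload_alt (payload : List (String × List (List (String × List (List (String × String)))))) (cut_index : Int) : List (String × List (List (String × List (List (String × String))))) :=
  ((PySem.Dict.ofList payload).insert "parts"
    (pvTrimGo cut_index 0 ((PySem.Dict.ofList payload).getD "parts" []))).items

-- ===== PRECONDITION & SPEC =====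
def Spec_trim_payload (payload : List (String × List (List (String × List (List (String × String)))))) (cut_index : Int) (out : List (String × List (List (String × List (List (String × String)))))) : Prop := out = trim_payload_alt payload cut_index
instance (payload : List (String × List (List (String × List (List (String × String)))))) (cut_index : Int) (out : List (String × List (List (String × List (List (String × String)))))) : Decidable (Spec_trim_payload payload cut_index out) := by
  unfold Spec_trim_payload
  have h2 : DecidableEq (List (List (String × String))) := inferInstance
  have h4 : DecidableEq (List (List (String × List (List (String × String))))) := inferInstance
  infer_instance

-- ===== CLAIM (what is proved, stated in full; the proofs are below) =====
def Claim_equal_trim_payload : Prop := ∀ (payload : List (String × List (List (String × List (List (String × String)))))) (cut_index : Int), Dom_trim_payload payload cut_index → Spec_trim_payload payload cut_index (trim_payload payload cut_index)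

-- ===== LEMMAS AND PROOFS =====

-- A's inner segment loop appends exactly the first (cut - g) segments and advances the counter by the part length.
theorem pv_inner_fold (cut : Int) (segs : List PvSeg) (g : Int) (acc : List PvSeg) :
    segs.foldl (fun (st2 : List PvSeg × Int) segment =>
        (if st2.2 < cut then st2.1 ++ [segment] else st2.1, st2.2 + 1)) (acc, g)
    = (acc ++ segs.take (cut - g).toNat, g + segs.length) := by
  induction segs generalizing g acc with
  | nil => simp
  | cons s t ih =>
    simp only [List.foldl_cons, ih]
    by_cases h : g < cut
    · have h1 : (cut - g).toNat = (cut - (g + 1)).toNat + 1 := by omega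
      simp [h, h1, List.take_succ_cons]
      omega
    · have h0 : (cut - g).toNat = 0 := by omega
      have h1 : (cut - (g + 1)).toNat = 0 := by omega
      simp [h, h0, h1]
      omega

-- B's slice segments[:take] is exactly what A's inner loop keeps.
theorem pv_kept_eq (cut g : Int) (segs : List PvSeg) :
    PySem.List.slice segs none (some (max 0 (min (segs.length : Int) (cut - g))))
    = segs.take (cut - g).toNat := by
  have hnn : (0:Int) ≤ max 0 (min (segs.length : Int) (cut - g)) := le_max_left _ _
  have hcast : max 0 (min (segs.length : Int) (cut - g))
      = ((max 0 (min (segs.length : Int) (cut - g))).toNat : Int) :=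
    (Int.toNat_of_nonneg hnn).symm
  rw [hcast, PySem.List.slice_to_natCast]
  rw [List.take_eq_take_iff]
  omega

-- A's outer loop (with its inner loop summarised by pv_inner_fold) from offset g builds
-- acc ++ pvTrimGo cut g parts and adds the total segment count to the offset.
theorem pv_outer_fold (cut : Int) (parts : List PvPart) (g : Int) (acc : List PvPart) :
    parts.foldl
      (fun (st : List PvPart × Int) part =>
        if (((PySem.Dict.ofList part).getD "segments" [] : List PvSeg).take
              (cut - st.2).toNat).isEmpty = true then
          (st.1, st.2 + (((PySem.Dict.ofList part).getD "segments" [] : List PvSeg).length : Int))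
        else
          (st.1 ++ [((PySem.Dict.ofList part).insert "segments"
                (((PySem.Dict.ofList part).getD "segments" [] : List PvSeg).take
                  (cut - st.2).toNat)).items],
            st.2 + (((PySem.Dict.ofList part).getD "segments" [] : List PvSeg).length : Int)))
      (acc, g)
    = (acc ++ pvTrimGo cut g parts,
       g + ((parts.map (fun p => (((PySem.Dict.ofList p).getD "segments" [] : List PvSeg).length : Int))).sum)) := by
  induction parts generalizing g acc with
  | nil => simp [pvTrimGo]
  | cons part rest ih =>
    simp only [List.foldl_cons, List.map_cons, List.sum_cons]
    rw [pvTrimGo]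
    simp only [pv_kept_eq]
    by_cases h : (((PySem.Dict.ofList part).getD "segments" [] : List PvSeg).take
        (cut - g).toNat).isEmpty = true
    · rw [if_pos h, if_pos h, ih]
      refine Prod.ext rfl ?_
      push_cast
      ring
    · rw [if_neg h, if_neg h, ih]
      refine Prod.ext ?_ ?_
      · simp
      · push_cast
        ring

-- ===== VERDICT (by name: the statement is the Claim_ definition above) =====
theorem trim_payload_spec : Claim_equal_trim_payload := by
  intro payload cut_index _
  unfold Spec_trim_payload trim_payload trim_payload_alt
  simp only [pv_inner_fold, List.nil_append]
  rw [pv_outer_fold]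
  simp
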